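-- pv_equiv track=rewrite | github.com/E1Bos/advent-of-code | solutions/2025/09.py | part2
-- ===== SOURCE A (Python) =====
-- def part2(data: list[tuple[int, int]]) -> int:
--     total_size: int = len(data)
--
--     edges: list[tuple[tuple[int, int], tuple[int, int]]] = []
--     for index in range(total_size):
--         point1 = data[index]
--         point2 = data[(index + 1) % total_size]
--         edges.append((point1, point2))
--
--     max_area: int = 0
--
--     for p1_index in range(total_size):
--         for p2_index in range(p1_index + 1, total_size):
--             point1: tuple[int, int] = data[p1_index]
--             point2: tuple[int, int] = data[p2_index]
--
--             min_x, max_x = min(point1[0], point2[0]), max(point1[0], point2[0])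
--             min_y, max_y = min(point1[1], point2[1]), max(point1[1], point2[1])
--
--             area: int = (max_x - min_x + 1) * (max_y - min_y + 1)
--
--             if area <= max_area:
--                 continue
--
--             inside_boundary: bool = True
--             for (edge_x1, edge_y1), (edge_x2, edge_y2) in edges:
--                 if edge_x1 == edge_x2:
--                     edge_x = edge_x1
--                     min_edge_y, max_edge_y = (
--                         min(edge_y1, edge_y2),
--                         max(edge_y1, edge_y2),
--                     )
--
--                     if min_x < edge_x < max_x:
--                         if max(min_y, min_edge_y) < min(max_y, max_edge_y):
--                             inside_boundary = False
--                             break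
--                 else:
--                     edge_y = edge_y1
--                     min_edge_x, max_edge_x = (
--                         min(edge_x1, edge_x2),
--                         max(edge_x1, edge_x2),
--                     )
--
--                     if min_y < edge_y < max_y:
--                         if max(min_x, min_edge_x) < min(max_x, max_edge_x):
--                             inside_boundary = False
--                             break
--
--             if not inside_boundary:
--                 continue
--
--             midpoint_x: int = (min_x + max_x) // 2
--             midpoint_y: int = (min_y + max_y) // 2
--
--             intersections: int = 0
--             for (edge_x1, edge_y1), (edge_x2, edge_y2) in edges:
--                 if edge_x1 == edge_x2:
--                     min_edge_y, max_edge_y = (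
--                         min(edge_y1, edge_y2),
--                         max(edge_y1, edge_y2),
--                     )
--                     if min_edge_y <= midpoint_y < max_edge_y:
--                         if edge_x1 > midpoint_x:
--                             intersections += 1
--
--             if intersections % 2 == 1:
--                 max_area = area
--
--     return max_area
-- ===== SOURCE B (Python) =====
-- def part2(data: list[tuple[int, int]]) -> int:
--     n = len(data)
--     edges = list(zip(data, data[1:] + data[:1]))
--
--     def valid(min_x, max_x, min_y, max_y):
--         blocked = any(
--             (min_x < x1 < max_x and max(min_y, min(y1, y2)) < min(max_y, max(y1, y2)))
--             if x1 == x2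
--             else (min_y < y1 < max_y and max(min_x, min(x1, x2)) < min(max_x, max(x1, x2)))
--             for (x1, y1), (x2, y2) in edges
--         )
--         if blocked:
--             return False
--         mid_x = (min_x + max_x) // 2
--         mid_y = (min_y + max_y) // 2
--         crossings = sum(
--             1
--             for (x1, y1), (x2, y2) in edges
--             if x1 == x2 and min(y1, y2) <= mid_y < max(y1, y2) and x1 > mid_x
--         )
--         return crossings % 2 == 1
--
--     candidates = []
--     for i in range(n):
--         x1, y1 = data[i]
--         for j in range(i + 1, n):
--             x2, y2 = data[j]
--             rect = (min(x1, x2), max(x1, x2), min(y1, y2), max(y1, y2))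
--             area = (rect[1] - rect[0] + 1) * (rect[3] - rect[2] + 1)
--             candidates.append((area, rect))
--     candidates.sort(key=lambda c: c[0], reverse=True)
--
--     for area, rect in candidates:
--         if valid(*rect):
--             return area
--     return 0
-- ===== Notes on version B (the rewrite author's own statement) =====
-- stated objective: alternative
-- what changed: A's running-max prune over all vertex pairs is replaced by building all candidate rectangles tagged with their area, sorting them by area in descending order, and returning the area of the first candidate that passes the edge-crossing and midpoint ray-cast tests (0 if none).
import Mathlib
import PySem

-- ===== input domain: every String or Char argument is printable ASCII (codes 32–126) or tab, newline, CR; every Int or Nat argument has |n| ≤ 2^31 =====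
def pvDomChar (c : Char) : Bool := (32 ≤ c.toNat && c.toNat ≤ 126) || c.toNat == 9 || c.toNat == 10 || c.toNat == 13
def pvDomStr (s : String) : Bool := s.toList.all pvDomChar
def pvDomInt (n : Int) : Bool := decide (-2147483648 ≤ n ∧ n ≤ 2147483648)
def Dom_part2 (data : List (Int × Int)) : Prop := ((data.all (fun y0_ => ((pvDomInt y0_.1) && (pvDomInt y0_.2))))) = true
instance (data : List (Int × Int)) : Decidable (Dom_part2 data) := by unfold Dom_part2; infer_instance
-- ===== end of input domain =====

-- B replaces A's running-max prune over all vertex pairs by "sort candidate rectangles by area descending, return the first valid one" (alternative decomposition, same validity tests).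

-- ===== PORT A =====
-- A's inner edge scan with `break`, as structural recursion (early return on a blocking edge).
def part2_boundLoop (minX maxX minY maxY : Int) : List ((Int × Int) × (Int × Int)) → Bool
  | [] => true
  | ((ex1, ey1), (ex2, ey2)) :: rest =>
    if ex1 == ex2 then
      if minX < ex1 ∧ ex1 < maxX then
        if max minY (min ey1 ey2) < min maxY (max ey1 ey2) then false
        else part2_boundLoop minX maxX minY maxY rest
      else part2_boundLoop minX maxX minY maxY rest
    else
      if minY < ey1 ∧ ey1 < maxY then
        if max minX (min ex1 ex2) < min maxX (max ex1 ex2) then false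
        else part2_boundLoop minX maxX minY maxY rest
      else part2_boundLoop minX maxX minY maxY rest

def part2 (data : List (Int × Int)) : Int :=
  let n : Int := (data.length : Int)
  let edges := (PySem.List.pyRange 0 n 1).foldl
    (fun acc index => acc ++ [(PySem.List.pyGetD data index (0, 0),
        PySem.List.pyGetD data (PySem.Int.mod (index + 1) n) (0, 0))]) []
  (PySem.List.pyRange 0 n 1).foldl (fun maxArea i =>
    (PySem.List.pyRange (i + 1) n 1).foldl (fun maxArea j =>
      let p1 := PySem.List.pyGetD data i (0, 0)
      let p2 := PySem.List.pyGetD data j (0, 0)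
      let minX := min p1.1 p2.1
      let maxX := max p1.1 p2.1
      let minY := min p1.2 p2.2
      let maxY := max p1.2 p2.2
      let area := (maxX - minX + 1) * (maxY - minY + 1)
      if area ≤ maxArea then maxArea
      else if !(part2_boundLoop minX maxX minY maxY edges) then maxArea
      else
        let midX := PySem.Int.floordiv (minX + maxX) 2
        let midY := PySem.Int.floordiv (minY + maxY) 2
        let inter := edges.foldl (fun c e =>
          if e.1.1 == e.2.1 then
            if min e.1.2 e.2.2 ≤ midY ∧ midY < max e.1.2 e.2.2 then
              if e.1.1 > midX then c + 1 else c
            else c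
          else c) (0 : Int)
        if PySem.Int.mod inter 2 == 1 then area else maxArea) maxArea) 0

-- ===== PORT B =====
def part2_valid (edges : List ((Int × Int) × (Int × Int))) (minX maxX minY maxY : Int) : Bool :=
  let blocked := edges.any (fun e =>
    if e.1.1 == e.2.1 then
      decide (minX < e.1.1 ∧ e.1.1 < maxX ∧ max minY (min e.1.2 e.2.2) < min maxY (max e.1.2 e.2.2))
    else
      decide (minY < e.1.2 ∧ e.1.2 < maxY ∧ max minX (min e.1.1 e.2.1) < min maxX (max e.1.1 e.2.1)))
  if blocked then false
  else
    let midX := PySem.Int.floordiv (minX + maxX) 2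
    let midY := PySem.Int.floordiv (minY + maxY) 2
    let crossings : Int := ((edges.countP (fun e =>
      e.1.1 == e.2.1 && decide (min e.1.2 e.2.2 ≤ midY) && decide (midY < max e.1.2 e.2.2)
        && decide (e.1.1 > midX)) : Nat) : Int)
    PySem.Int.mod crossings 2 == 1

-- B's final loop: first candidate (in sorted order) passing the validity test.
def part2_firstValid (edges : List ((Int × Int) × (Int × Int))) :
    List (Int × (Int × Int × Int × Int)) → Int
  | [] => 0
  | c :: rest =>
    if part2_valid edges c.2.1 c.2.2.1 c.2.2.2.1 c.2.2.2.2 then c.1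
    else part2_firstValid edges rest

def part2_alt (data : List (Int × Int)) : Int :=
  let n : Int := (data.length : Int)
  let edges := data.zip (PySem.List.slice data (some 1) none ++ PySem.List.slice data none (some 1))
  let candidates := (PySem.List.pyRange 0 n 1).foldl (fun acc i =>
    let p1 := PySem.List.pyGetD data i (0, 0)
    (PySem.List.pyRange (i + 1) n 1).foldl (fun acc j =>
      let p2 := PySem.List.pyGetD data j (0, 0)
      let rect := (min p1.1 p2.1, max p1.1 p2.1, min p1.2 p2.2, max p1.2 p2.2)
      let area := (rect.2.1 - rect.1 + 1) * (rect.2.2.2 - rect.2.2.1 + 1)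
      acc ++ [(area, rect)]) acc) []
  part2_firstValid edges (PySem.List.sorted candidates (fun c => c.1) true)

-- ===== PRECONDITION & SPEC =====
def Spec_part2 (data : List (Int × Int)) (out : Int) : Prop := out = part2_alt data
instance (data : List (Int × Int)) (out : Int) : Decidable (Spec_part2 data out) := by unfold Spec_part2; infer_instance

-- ===== CLAIM (what is proved, stated in full; the proofs are below) =====
def Claim_equal_part2 : Prop := ∀ (data : List (Int × Int)), Dom_part2 data → Spec_part2 data (part2 data)

-- ===== LEMMAS AND PROOFS =====

-- The candidate one vertex pair contributes: (area, (min_x, max_x, min_y, max_y)).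
def pvCand (data : List (Int × Int)) (i j : Int) : Int × (Int × Int × Int × Int) :=
  let p1 := PySem.List.pyGetD data i (0, 0)
  let p2 := PySem.List.pyGetD data j (0, 0)
  ((max p1.1 p2.1 - min p1.1 p2.1 + 1) * (max p1.2 p2.2 - min p1.2 p2.2 + 1),
   (min p1.1 p2.1, max p1.1 p2.1, min p1.2 p2.2, max p1.2 p2.2))

-- A's loop step, phrased on candidates: keep the max of the valid areas seen so far.
def pvStep (edges : List ((Int × Int) × (Int × Int))) (m : Int) (c : Int × (Int × Int × Int × Int)) : Int :=
  if part2_valid edges c.2.1 c.2.2.1 c.2.2.2.1 c.2.2.2.2 then max m c.1 else m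

-- A's boundary loop is the negation of B's `any`.
lemma bound_eq (minX maxX minY maxY : Int) (es : List ((Int × Int) × (Int × Int))) :
    part2_boundLoop minX maxX minY maxY es
      = !es.any (fun e =>
          if e.1.1 == e.2.1 then
            decide (minX < e.1.1 ∧ e.1.1 < maxX ∧ max minY (min e.1.2 e.2.2) < min maxY (max e.1.2 e.2.2))
          else
            decide (minY < e.1.2 ∧ e.1.2 < maxY ∧ max minX (min e.1.1 e.2.1) < min maxX (max e.1.1 e.2.1))) := by
  induction es with
  | nil => rfl
  | cons e rest ih =>
    obtain ⟨⟨ex1, ey1⟩, ex2, ey2⟩ := e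
    simp only [part2_boundLoop, List.any_cons, Bool.not_or]
    by_cases hx : ex1 == ex2 <;> simp only [hx, if_pos,  if_false, Bool.false_eq_true] <;>
      split_ifs with h1 h2 <;> simp_all <;> omega

-- A's intersection counter is B's countP.
lemma inter_eq (midX midY : Int) (es : List ((Int × Int) × (Int × Int))) :
    es.foldl (fun c e =>
        if e.1.1 == e.2.1 then
          if min e.1.2 e.2.2 ≤ midY ∧ midY < max e.1.2 e.2.2 then
            if e.1.1 > midX then c + 1 else c
          else c
        else c) (0 : Int)
      = ((es.countP (fun e =>
          e.1.1 == e.2.1 && decide (min e.1.2 e.2.2 ≤ midY) && decide (midY < max e.1.2 e.2.2)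
            && decide (e.1.1 > midX)) : Nat) : Int) := by
  have hf : (fun (c : Int) (e : (Int × Int) × Int × Int) =>
      if e.1.1 == e.2.1 then
        if min e.1.2 e.2.2 ≤ midY ∧ midY < max e.1.2 e.2.2 then
          if e.1.1 > midX then c + 1 else c
        else c
      else c)
      = (fun (c : Int) e =>
        if (e.1.1 == e.2.1 && decide (min e.1.2 e.2.2 ≤ midY) && decide (midY < max e.1.2 e.2.2)
          && decide (e.1.1 > midX)) then c + 1 else c) := by
    funext c e
    rcases e with ⟨⟨x1, y1⟩, x2, y2⟩
    dsimp only
    by_cases h : x1 = x2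
    · subst h
      simp only [beq_self_eq_true, if_true, Bool.true_and, Bool.and_eq_true, decide_eq_true_eq]
      split_ifs <;> simp_all
    · simp [h]
  rw [hf, PySem.List.foldl_if_add_one]
  simp

-- A's loop body equals pvStep.
lemma step_eq (edges : List ((Int × Int) × (Int × Int))) (minX maxX minY maxY m : Int) :
    (if (maxX - minX + 1) * (maxY - minY + 1) ≤ m then m
     else if !(part2_boundLoop minX maxX minY maxY edges) then m
     else if PySem.Int.mod (edges.foldl (fun c e =>
        if e.1.1 == e.2.1 then
          if min e.1.2 e.2.2 ≤ PySem.Int.floordiv (minY + maxY) 2 ∧ PySem.Int.floordiv (minY + maxY) 2 < max e.1.2 e.2.2 then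
            if e.1.1 > PySem.Int.floordiv (minX + maxX) 2 then c + 1 else c
          else c
        else c) (0 : Int)) 2 == 1 then (maxX - minX + 1) * (maxY - minY + 1) else m)
      = pvStep edges m ((maxX - minX + 1) * (maxY - minY + 1), (minX, maxX, minY, maxY)) := by
  have hv : part2_valid edges minX maxX minY maxY
      = (!(edges.any (fun e =>
          if e.1.1 == e.2.1 then
            decide (minX < e.1.1 ∧ e.1.1 < maxX ∧ max minY (min e.1.2 e.2.2) < min maxY (max e.1.2 e.2.2))
          else
            decide (minY < e.1.2 ∧ e.1.2 < maxY ∧ max minX (min e.1.1 e.2.1) < min maxX (max e.1.1 e.2.1))))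
        && (PySem.Int.mod ((edges.countP (fun e =>
            e.1.1 == e.2.1 && decide (min e.1.2 e.2.2 ≤ PySem.Int.floordiv (minY + maxY) 2)
              && decide (PySem.Int.floordiv (minY + maxY) 2 < max e.1.2 e.2.2)
              && decide (e.1.1 > PySem.Int.floordiv (minX + maxX) 2)) : Nat) : Int) 2 == 1)) := by
    unfold part2_valid
    simp
  rw [bound_eq, inter_eq]
  show _ = if part2_valid edges minX maxX minY maxY = true
      then max m ((maxX - minX + 1) * (maxY - minY + 1)) else m
  rw [hv]
  by_cases hb : edges.any (fun e =>
      if e.1.1 == e.2.1 then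
        decide (minX < e.1.1 ∧ e.1.1 < maxX ∧ max minY (min e.1.2 e.2.2) < min maxY (max e.1.2 e.2.2))
      else
        decide (minY < e.1.2 ∧ e.1.2 < maxY ∧ max minX (min e.1.1 e.2.1) < min maxX (max e.1.1 e.2.1))) = true
  · simp only [hb, Bool.not_true, Bool.not_false, if_true, Bool.false_and, Bool.false_eq_true, if_false]
    split_ifs <;> omega
  · simp only [Bool.not_eq_true] at hb
    simp only [hb, Bool.not_false, Bool.not_true, Bool.false_eq_true, if_false, Bool.true_and]
    by_cases ho : PySem.Int.mod ((edges.countP (fun e =>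
        e.1.1 == e.2.1 && decide (min e.1.2 e.2.2 ≤ PySem.Int.floordiv (minY + maxY) 2)
          && decide (PySem.Int.floordiv (minY + maxY) 2 < max e.1.2 e.2.2)
          && decide (e.1.1 > PySem.Int.floordiv (minX + maxX) 2)) : Nat) : Int) 2 == 1
    · simp only [ho, if_true]
      split_ifs <;> omega
    · simp only [ho, Bool.false_eq_true, if_false]
      split_ifs <;> omega
-- The two edge lists coincide.
lemma edges_eq (data : List (Int × Int)) :
    (PySem.List.pyRange 0 (data.length : Int) 1).foldl
      (fun acc index => acc ++ [(PySem.List.pyGetD data index (0, 0),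
          PySem.List.pyGetD data (PySem.Int.mod (index + 1) (data.length : Int)) (0, 0))]) []
      = data.zip (PySem.List.slice data (some 1) none ++ PySem.List.slice data none (some 1)) := by
  rw [PySem.List.foldl_append_singleton_eq_map, List.nil_append,
    PySem.List.slice_from data (by norm_num : (0:Int) ≤ 1),
    PySem.List.slice_to data (by norm_num : (0:Int) ≤ 1)]
  have hn : (1:Int).toNat = 1 := rfl
  rw [hn]
  apply List.ext_getElem
  · simp [PySem.List.length_pyRange_one]
    omega
  · intro k h1 h2
    have hk : k < data.length := by
      simpa [PySem.List.length_pyRange_one] using h1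
    rw [List.getElem_map, PySem.List.getElem_pyRange_one, List.getElem_zip]
    have hcast : (0:Int) + (k:Int) = ((k:Nat):Int) := by omega
    rw [hcast, PySem.List.pyGetD_natCast, List.getD_eq_getElem data (0,0) hk]
    have hcast2 : ((k:Nat):Int) + 1 = (((k+1:Nat)):Int) := by push_cast; ring
    rw [hcast2, PySem.Int.mod_natCast, PySem.List.pyGetD_natCast]
    have hmod : (k+1) % data.length < data.length := Nat.mod_lt _ (by omega)
    rw [List.getD_eq_getElem data (0,0) hmod]
    refine Prod.ext rfl ?_
    have hk2 : k < (data.drop 1 ++ data.take 1).length := by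
      simp
      omega
    show data[(k+1) % data.length] = (data.drop 1 ++ data.take 1)[k]'hk2
    rw [List.getElem_append]
    by_cases hlt : k < (data.drop 1).length
    · rw [dif_pos hlt, List.getElem_drop]
      have hsm : k < data.length - 1 := by simpa using hlt
      congr 1
      rw [Nat.mod_eq_of_lt (by omega)]
      omega
    · rw [dif_neg hlt, List.getElem_take]
      have hsm : ¬ k < data.length - 1 := by simpa using hlt
      have hk1 : k + 1 = data.length := by omega
      congr 1
      rw [hk1, Nat.mod_self]
      simp
      omega

-- Folding a step over a nested append-built list is the nested fold.
lemma foldl_nested {α β : Type} (L : List Int) (F : Int → List Int) (g : Int → Int → α)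
    (step : β → α → β) (init : β) :
    (L.foldl (fun acc i => (F i).foldl (fun acc j => acc ++ [g i j]) acc) []).foldl step init
      = L.foldl (fun m i => (F i).foldl (fun m j => step m (g i j)) m) init := by
  simp only [PySem.List.foldl_append_singleton_eq_map, PySem.List.foldl_append_eq_flatMap,
    List.nil_append, List.foldl_flatMap, List.foldl_map]

-- Every candidate area is ≥ 1.
lemma cand_pos (data : List (Int × Int)) (i j : Int) : 1 ≤ (pvCand data i j).1 := by
  unfold pvCand
  have h1 : (1:Int) ≤ max (PySem.List.pyGetD data i (0,0)).1 (PySem.List.pyGetD data j (0,0)).1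
      - min (PySem.List.pyGetD data i (0,0)).1 (PySem.List.pyGetD data j (0,0)).1 + 1 := by
    have := min_le_max (a := (PySem.List.pyGetD data i (0,0)).1) (b := (PySem.List.pyGetD data j (0,0)).1)
    omega
  have h2 : (1:Int) ≤ max (PySem.List.pyGetD data i (0,0)).2 (PySem.List.pyGetD data j (0,0)).2
      - min (PySem.List.pyGetD data i (0,0)).2 (PySem.List.pyGetD data j (0,0)).2 + 1 := by
    have := min_le_max (a := (PySem.List.pyGetD data i (0,0)).2) (b := (PySem.List.pyGetD data j (0,0)).2)
    omega
  nlinarith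

-- Once the accumulator dominates every remaining area, the fold is constant.
lemma foldl_step_const (edges : List ((Int × Int) × (Int × Int)))
    (S : List (Int × (Int × Int × Int × Int))) (m : Int)
    (h : ∀ b ∈ S, b.1 ≤ m) : S.foldl (pvStep edges) m = m := by
  induction S with
  | nil => rfl
  | cons b rest ih =>
    have hb := h b (by simp)
    have hstep : pvStep edges m b = m := by
      unfold pvStep; split_ifs <;> omega
    simp only [List.foldl_cons, hstep]
    exact ih (fun c hc => h c (by simp [hc]))

-- On a descending-by-area list of positive-area candidates, "first valid" is "max valid".
lemma firstValid_eq_foldl (edges : List ((Int × Int) × (Int × Int)))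
    (S : List (Int × (Int × Int × Int × Int)))
    (hpw : S.Pairwise (fun a b => b.1 ≤ a.1)) (hpos : ∀ c ∈ S, 1 ≤ c.1) :
    part2_firstValid edges S = S.foldl (pvStep edges) 0 := by
  induction S with
  | nil => rfl
  | cons c rest ih =>
    have hle : ∀ b ∈ rest, b.1 ≤ c.1 := fun b hb => (List.pairwise_cons.mp hpw).1 b hb
    have hc1 := hpos c (by simp)
    by_cases hv : part2_valid edges c.2.1 c.2.2.1 c.2.2.2.1 c.2.2.2.2 = true
    · have hLHS : part2_firstValid edges (c :: rest) = c.1 := by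
        have h0 : part2_firstValid edges (c :: rest)
            = if part2_valid edges c.2.1 c.2.2.1 c.2.2.2.1 c.2.2.2.2 then c.1
              else part2_firstValid edges rest := rfl
        rw [h0, if_pos hv]
      have hstep : pvStep edges 0 c = c.1 := by unfold pvStep; simp [hv]; omega
      rw [hLHS, List.foldl_cons, hstep, foldl_step_const edges rest c.1 hle]
    · have hLHS : part2_firstValid edges (c :: rest) = part2_firstValid edges rest := by
        have h0 : part2_firstValid edges (c :: rest)
            = if part2_valid edges c.2.1 c.2.2.1 c.2.2.2.1 c.2.2.2.2 then c.1
              else part2_firstValid edges rest := rfl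
        rw [h0, if_neg hv]
      have hstep : pvStep edges 0 c = 0 := by unfold pvStep; simp [hv]
      rw [hLHS, List.foldl_cons, hstep,
        ih (List.pairwise_cons.mp hpw).2 (fun b hb => hpos b (by simp [hb]))]

lemma part2_eq (data : List (Int × Int)) : part2 data = part2_alt data := by
  unfold part2 part2_alt
  dsimp only
  simp only [edges_eq data]
  simp only [step_eq]
  rw [← foldl_nested (PySem.List.pyRange 0 (data.length : Int))
    (fun i => PySem.List.pyRange (i + 1) (data.length : Int))
    (fun i j => ((max (PySem.List.pyGetD data i (0, 0)).1 (PySem.List.pyGetD data j (0, 0)).1 -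
        min (PySem.List.pyGetD data i (0, 0)).1 (PySem.List.pyGetD data j (0, 0)).1 + 1) *
      (max (PySem.List.pyGetD data i (0, 0)).2 (PySem.List.pyGetD data j (0, 0)).2 -
        min (PySem.List.pyGetD data i (0, 0)).2 (PySem.List.pyGetD data j (0, 0)).2 + 1),
    min (PySem.List.pyGetD data i (0, 0)).1 (PySem.List.pyGetD data j (0, 0)).1,
    max (PySem.List.pyGetD data i (0, 0)).1 (PySem.List.pyGetD data j (0, 0)).1,
    min (PySem.List.pyGetD data i (0, 0)).2 (PySem.List.pyGetD data j (0, 0)).2,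
    max (PySem.List.pyGetD data i (0, 0)).2 (PySem.List.pyGetD data j (0, 0)).2))
    (pvStep (data.zip (PySem.List.slice data (some 1) ++ PySem.List.slice data none (some 1)))) 0]
  set E := data.zip (PySem.List.slice data (some 1) ++ PySem.List.slice data none (some 1)) with hE
  set C := List.foldl (fun acc i =>
      List.foldl (fun acc j => acc ++ [((max (PySem.List.pyGetD data i (0, 0)).1 (PySem.List.pyGetD data j (0, 0)).1 -
        min (PySem.List.pyGetD data i (0, 0)).1 (PySem.List.pyGetD data j (0, 0)).1 + 1) *
      (max (PySem.List.pyGetD data i (0, 0)).2 (PySem.List.pyGetD data j (0, 0)).2 -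
        min (PySem.List.pyGetD data i (0, 0)).2 (PySem.List.pyGetD data j (0, 0)).2 + 1),
    min (PySem.List.pyGetD data i (0, 0)).1 (PySem.List.pyGetD data j (0, 0)).1,
    max (PySem.List.pyGetD data i (0, 0)).1 (PySem.List.pyGetD data j (0, 0)).1,
    min (PySem.List.pyGetD data i (0, 0)).2 (PySem.List.pyGetD data j (0, 0)).2,
    max (PySem.List.pyGetD data i (0, 0)).2 (PySem.List.pyGetD data j (0, 0)).2)])
        acc (PySem.List.pyRange (i + 1) (data.length : Int)))
      [] (PySem.List.pyRange 0 (data.length : Int)) with hC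
  have hpos : ∀ c ∈ C, 1 ≤ c.1 := by
    intro c hc
    rw [hC] at hc
    simp only [PySem.List.foldl_append_singleton_eq_map, PySem.List.foldl_append_eq_flatMap,
      List.nil_append] at hc
    obtain ⟨i, hi, hc2⟩ := List.mem_flatMap.mp hc
    obtain ⟨j, hj, rfl⟩ := List.mem_map.mp hc2
    exact cand_pos data i j
  rw [firstValid_eq_foldl E _ (PySem.List.sorted_pairwise_rev C (fun c => c.1))
    (fun c hc => hpos c ((PySem.List.mem_sorted C (fun c => c.1) true c).mp hc))]
  exact ((PySem.List.sorted_perm C (fun c => c.1) true).foldl_eq'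
    (fun x _ y _ z => by unfold pvStep; split_ifs <;> omega) 0).symm

-- ===== VERDICT (by name: the statement is the Claim_ definition above) =====
theorem part2_spec : Claim_equal_part2 := by
  intro data _
  unfold Spec_part2
  exact part2_eq data
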